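-- pv_equiv track=rewrite | github.com/clarakuempel/Assertions | utils/open_questions.py | _dedupe_longest_first
-- ===== SOURCE A (Python) =====
-- def _dedupe_longest_first(strings: list[str]) -> list[str]:
--     seen: set[str] = set()
--     out: list[str] = []
--     for s in sorted((x.strip() for x in strings if x and str(x).strip()), key=len, reverse=True):
--         k = s.lower()
--         if k not in seen:
--             seen.add(k)
--             out.append(s)
--     return out
-- ===== SOURCE B (Python) =====
-- def _dedupe_longest_first(strings: list[str]) -> list[str]:
--     # Dedupe first (insertion-ordered dict keyed by casefolded text, keeping the
--     # first stripped occurrence), then sort the few survivors once.  Case folding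
--     # preserves length, so "first occurrence" is exactly the entry A's
--     # sort-then-scan keeps, and the stable sort reproduces A's tie order.
--     best: dict[str, str] = {}
--     for x in strings:
--         if x and str(x).strip():
--             s = x.strip()
--             k = s.lower()
--             if k not in best:
--                 best[k] = s
--     return sorted(best.values(), key=len, reverse=True)
-- ===== Notes on version B (the rewrite author's own statement) =====
-- stated objective: alternative
-- what changed: A sorts every cleaned string and then scans with a seen-set to drop case-insensitive duplicates; B instead builds an insertion-ordered dict of first stripped occurrences per lowercased key in one pass and sorts only the surviving representatives, relying on length-preserving case folding plus sort stability for the identical order.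
import Mathlib
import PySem

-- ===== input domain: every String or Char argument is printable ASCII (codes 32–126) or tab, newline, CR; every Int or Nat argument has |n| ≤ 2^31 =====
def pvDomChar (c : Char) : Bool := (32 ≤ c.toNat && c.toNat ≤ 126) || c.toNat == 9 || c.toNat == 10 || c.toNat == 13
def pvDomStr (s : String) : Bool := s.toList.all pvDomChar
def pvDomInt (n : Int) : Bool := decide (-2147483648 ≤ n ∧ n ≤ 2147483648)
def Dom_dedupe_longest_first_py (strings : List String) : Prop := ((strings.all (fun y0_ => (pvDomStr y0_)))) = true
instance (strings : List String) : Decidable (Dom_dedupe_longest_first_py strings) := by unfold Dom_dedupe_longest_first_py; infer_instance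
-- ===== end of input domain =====

-- B dedupes first (insertion-ordered dict of first stripped occurrence per lowercased key) and sorts
-- only the survivors, instead of A's sort-everything-then-scan-with-a-seen-set; same return value.

-- ===== PORT A =====
-- the 'for s in …: if k not in seen: seen.add(k); out.append(s)' loop
def pvLoopA (seen : PySem.Set String) (out : List String) : List String → List String
  | [] => out
  | s :: rest =>
      let k := PySem.Str.lower s
      if k ∈ seen then pvLoopA seen out rest
      else pvLoopA (seen.add k) (out ++ [s]) rest

def dedupe_longest_first_py (strings : List String) : List String :=
  -- sorted((x.strip() for x in strings if x and str(x).strip()), key=len, reverse=True)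
  pvLoopA (PySem.Set.ofList []) []
    (PySem.List.sorted
      ((strings.filter (fun x => x ≠ "" && PySem.Str.strip x ≠ "")).map (fun x => PySem.Str.strip x))
      (fun s => PySem.Str.len s) true)

-- ===== PORT B =====
-- the 'for x in strings: if x and str(x).strip(): … if k not in best: best[k] = s' loop
def pvLoopB : PySem.Dict String String → List String → PySem.Dict String String
  | d, [] => d
  | d, x :: rest =>
      if x ≠ "" && PySem.Str.strip x ≠ "" then
        let s := PySem.Str.strip x
        let k := PySem.Str.lower s
        if d.contains k then pvLoopB d rest else pvLoopB (d.insert k s) rest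
      else pvLoopB d rest

def dedupe_longest_first_py_alt (strings : List String) : List String :=
  -- sorted(best.values(), key=len, reverse=True)
  PySem.List.sorted (pvLoopB PySem.Dict.empty strings).values (fun s => PySem.Str.len s) true

-- ===== PRECONDITION & SPEC =====
def Spec_dedupe_longest_first_py (strings : List String) (out : List String) : Prop := out = dedupe_longest_first_py_alt strings
instance (strings : List String) (out : List String) : Decidable (Spec_dedupe_longest_first_py strings out) := by unfold Spec_dedupe_longest_first_py; infer_instance

-- ===== CLAIM (what is proved, stated in full; the proofs are below) =====
def Claim_equal_dedupe_longest_first_py : Prop := ∀ (strings : List String), Dom_dedupe_longest_first_py strings → Spec_dedupe_longest_first_py strings (dedupe_longest_first_py strings)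

-- ===== LEMMAS AND PROOFS =====

-- proof-side vocabulary
def pvKey (s : String) : String := PySem.Str.lower s
def pvLen (s : String) : Int := PySem.Str.len s
def pvB (x y : String) : Bool := decide (pvLen y < pvLen x)
def pvClean (strings : List String) : List String :=
  (strings.filter (fun x => x ≠ "" && PySem.Str.strip x ≠ "")).map (fun x => PySem.Str.strip x)

-- first-occurrence dedup by pvKey, seen keys accumulated as a list
def pvDD (seen : List String) : List String → List String
  | [] => []
  | s :: l => if pvKey s ∈ seen then pvDD seen l else s :: pvDD (pvKey s :: seen) l

theorem pvLen_lower (s : String) : pvLen (PySem.Str.lower s) = pvLen s := by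
  simp [pvLen, pysem, PySem.Chars.lower]

theorem pvLen_of_key_eq {a b : String} (h : pvKey a = pvKey b) : pvLen a = pvLen b := by
  have ha := pvLen_lower a
  have hb := pvLen_lower b
  simp only [pvKey] at h
  rw [← ha, h, hb]

theorem mem_pvDD {a : String} {seen l : List String} (h : a ∈ pvDD seen l) : a ∈ l := by
  induction l generalizing seen with
  | nil => simp [pvDD] at h
  | cons s t ih =>
    simp only [pvDD] at h
    split at h
    · exact List.mem_cons_of_mem _ (ih h)
    · rcases List.mem_cons.1 h with h | h
      · simp [h]
      · exact List.mem_cons_of_mem _ (ih h)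

theorem pvDD_congr {seen1 seen2 l : List String}
    (h : ∀ s ∈ l, (pvKey s ∈ seen1 ↔ pvKey s ∈ seen2)) : pvDD seen1 l = pvDD seen2 l := by
  induction l generalizing seen1 seen2 with
  | nil => rfl
  | cons s t ih =>
    have hs := h s (by simp)
    simp only [pvDD]
    by_cases hm : pvKey s ∈ seen1
    · rw [if_pos hm, if_pos (hs.1 hm)]
      exact ih fun a ha => h a (List.mem_cons_of_mem _ ha)
    · rw [if_neg hm, if_neg (fun hc => hm (hs.2 hc))]
      refine congrArg _ (ih fun a ha => ?_)
      have := h a (List.mem_cons_of_mem _ ha)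
      simp only [List.mem_cons]
      tauto

theorem insertBy_all_before {x : String} {ys : List String}
    (h : ∀ y ∈ ys, pvB x y = true) : PySem.List.insertBy pvB x ys = x :: ys := by
  cases ys with
  | nil => rfl
  | cons z t =>
    show (if pvB x z then x :: z :: t else z :: PySem.List.insertBy pvB x t) = _
    rw [if_pos (h z (by simp))]

theorem pvDD_insert_seen {x : String} {S seen : List String} (h : pvKey x ∈ seen) :
    pvDD seen (PySem.List.insertBy pvB x S) = pvDD seen S := by
  induction S generalizing seen with
  | nil => simp [PySem.List.insertBy, pvDD, h]
  | cons z t ih =>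
    show pvDD seen (if pvB x z then x :: z :: t else z :: PySem.List.insertBy pvB x t) = _
    by_cases hb : pvB x z = true
    · rw [if_pos hb]; simp [pvDD, h]
    · rw [if_neg hb]
      simp only [pvDD]
      by_cases hz : pvKey z ∈ seen
      · rw [if_pos hz, if_pos hz, ih h]
      · rw [if_neg hz, if_neg hz, ih (List.mem_cons_of_mem _ h)]

theorem pvDD_insert_dup {x : String} {S seen : List String} (h0 : pvKey x ∉ seen)
    (hw : ∃ y ∈ S, pvKey y = pvKey x)
    (hS : S.Pairwise (fun a b => pvLen b ≤ pvLen a)) :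
    pvDD seen (PySem.List.insertBy pvB x S) = pvDD seen S := by
  induction S generalizing seen with
  | nil => exact absurd hw (by simp)
  | cons z t ih =>
    rcases List.pairwise_cons.1 hS with ⟨hz_ge, ht⟩
    show pvDD seen (if pvB x z then x :: z :: t else z :: PySem.List.insertBy pvB x t) = _
    by_cases hb : pvB x z = true
    · -- impossible: a same-key witness would have the same length, but all of z :: t is shorter
      exfalso
      have hzx : pvLen z < pvLen x := by simpa [pvB] using hb
      rcases hw with ⟨y, hy, hky⟩
      have hylen : pvLen y = pvLen x := pvLen_of_key_eq hky
      rcases List.mem_cons.1 hy with rfl | hy'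
      · omega
      · have := hz_ge y hy'; omega
    · rw [if_neg hb]
      simp only [pvDD]
      have hzx : ¬ pvLen z < pvLen x := by simpa [pvB] using hb
      have hwz : pvKey z ≠ pvKey x → ∃ y ∈ t, pvKey y = pvKey x := by
        intro hne
        rcases hw with ⟨y, hy, hky⟩
        rcases List.mem_cons.1 hy with rfl | hy'
        · exact absurd hky hne
        · exact ⟨y, hy', hky⟩
      by_cases hz : pvKey z ∈ seen
      · rw [if_pos hz, if_pos hz]
        have hne : pvKey z ≠ pvKey x := fun he => h0 (he ▸ hz)
        exact ih h0 (hwz hne) ht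
      · rw [if_neg hz, if_neg hz]
        by_cases he : pvKey z = pvKey x
        · exact congrArg _ (pvDD_insert_seen (by simp [he]))
        · refine congrArg _ (ih ?_ (hwz he) ht)
          intro hc
          rcases List.mem_cons.1 hc with h | h
          · exact he h.symm
          · exact h0 h

theorem pvDD_insert_fresh {x : String} {S seen : List String} (h0 : pvKey x ∉ seen)
    (hf : pvKey x ∉ S.map pvKey)
    (hS : S.Pairwise (fun a b => pvLen b ≤ pvLen a)) :
    pvDD seen (PySem.List.insertBy pvB x S) = PySem.List.insertBy pvB x (pvDD seen S) := by
  induction S generalizing seen with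
  | nil => simp [PySem.List.insertBy, pvDD, h0]
  | cons z t ih =>
    rcases List.pairwise_cons.1 hS with ⟨hz_ge, ht⟩
    have hfz : pvKey x ≠ pvKey z := by simp at hf; exact hf.1
    have hft : pvKey x ∉ t.map pvKey := by simp at hf ⊢; exact hf.2
    show pvDD seen (if pvB x z then x :: z :: t else z :: PySem.List.insertBy pvB x t) = _
    by_cases hb : pvB x z = true
    · rw [if_pos hb]
      have hzx : pvLen z < pvLen x := by simpa [pvB] using hb
      have hall : ∀ y ∈ pvDD seen (z :: t), pvB x y = true := by
        intro y hy
        have hyz : y ∈ z :: t := mem_pvDD hy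
        rcases List.mem_cons.1 hyz with rfl | hy'
        · simpa [pvB] using hzx
        · have := hz_ge y hy'
          simp only [pvB, decide_eq_true_eq]; omega
      rw [insertBy_all_before hall]
      show (if pvKey x ∈ seen then pvDD seen (z :: t) else x :: pvDD (pvKey x :: seen) (z :: t))
          = x :: pvDD seen (z :: t)
      rw [if_neg h0]
      refine congrArg _ (pvDD_congr fun a ha => ?_)
      have hne : pvKey a ≠ pvKey x := fun he => hf (List.mem_map.2 ⟨a, ha, he⟩)
      simp [List.mem_cons, hne]
    · rw [if_neg hb]
      simp only [pvDD]
      by_cases hz : pvKey z ∈ seen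
      · rw [if_pos hz, if_pos hz, ih h0 hft ht]
      · rw [if_neg hz, if_neg hz, ih (by simp [h0, hfz]) hft ht]
        show _ = (if pvB x z then x :: z :: pvDD (pvKey z :: seen) t else z :: PySem.List.insertBy pvB x (pvDD (pvKey z :: seen) t))
        rw [if_neg hb]

theorem pvDD_append_single (l : List String) (x : String) (seen : List String) :
    pvDD seen (l ++ [x]) =
      pvDD seen l ++ (if pvKey x ∈ seen ∨ pvKey x ∈ l.map pvKey then [] else [x]) := by
  induction l generalizing seen with
  | nil => by_cases h : pvKey x ∈ seen <;> simp [pvDD, h]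
  | cons s t ih =>
    simp only [List.cons_append, pvDD]
    by_cases hs : pvKey s ∈ seen
    · rw [if_pos hs, if_pos hs, ih]
      have hiff : (pvKey x ∈ seen ∨ pvKey x ∈ t.map pvKey)
          ↔ (pvKey x ∈ seen ∨ pvKey x ∈ (s :: t).map pvKey) := by
        simp only [List.map_cons, List.mem_cons]
        constructor
        · tauto
        · rintro (h | h | h)
          · tauto
          · exact Or.inl (h ▸ hs)
          · tauto
      rw [if_congr hiff rfl rfl]
    · rw [if_neg hs, if_neg hs, ih]
      have hiff : (pvKey x ∈ (pvKey s :: seen) ∨ pvKey x ∈ t.map pvKey)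
          ↔ (pvKey x ∈ seen ∨ pvKey x ∈ (s :: t).map pvKey) := by
        simp only [List.map_cons, List.mem_cons]
        tauto
      rw [if_congr hiff rfl rfl]
      simp

theorem pvComm (L : List String) :
    pvDD [] (PySem.List.sorted L pvLen true) = PySem.List.sorted (pvDD [] L) pvLen true := by
  induction L using List.reverseRecOn with
  | nil => simp [PySem.List.sorted_rev_eq_foldl_insertBy, pvDD]
  | append_singleton L x ih =>
    have hins : ∀ M : List String, PySem.List.sorted (M ++ [x]) pvLen true
        = PySem.List.insertBy pvB x (PySem.List.sorted M pvLen true) := by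
      intro M
      rw [PySem.List.sorted_rev_eq_foldl_insertBy, PySem.List.sorted_rev_eq_foldl_insertBy,
        List.foldl_append]
      rfl
    rw [hins L, pvDD_append_single]
    have hperm : (PySem.List.sorted L pvLen true).Perm L := PySem.List.sorted_perm L pvLen true
    have hpw : (PySem.List.sorted L pvLen true).Pairwise (fun a b => pvLen b ≤ pvLen a) :=
      PySem.List.sorted_pairwise_rev L pvLen
    by_cases hx : pvKey x ∈ L.map pvKey
    · rcases List.mem_map.1 hx with ⟨y, hy, hky⟩
      rw [pvDD_insert_dup (by simp) ⟨y, hperm.mem_iff.2 hy, hky⟩ hpw, ih]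
      rw [if_pos (Or.inr hx)]
      simp
    · have hfs : pvKey x ∉ (PySem.List.sorted L pvLen true).map pvKey := by
        intro hc
        rcases List.mem_map.1 hc with ⟨y, hy, hky⟩
        exact hx (List.mem_map.2 ⟨y, hperm.mem_iff.1 hy, hky⟩)
      rw [pvDD_insert_fresh (by simp) hfs hpw, ih, if_neg (by simp [hx]), hins]

theorem pvLoopA_eq (l : List String) (seen : PySem.Set String) (seenL : List String)
    (out : List String) (h : ∀ k, k ∈ seen ↔ k ∈ seenL) :
    pvLoopA seen out l = out ++ pvDD seenL l := by
  induction l generalizing seen seenL out with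
  | nil => simp [pvLoopA, pvDD]
  | cons s t ih =>
    simp only [pvLoopA, pvDD, pvKey]
    by_cases hm : PySem.Str.lower s ∈ seenL
    · rw [if_pos ((h _).2 hm), if_pos hm, ih _ _ _ h]
    · rw [if_neg (fun hc => hm ((h _).1 hc)), if_neg hm]
      have hnew : ∀ k, k ∈ seen.add (PySem.Str.lower s) ↔ k ∈ PySem.Str.lower s :: seenL := by
        intro k
        rw [PySem.Set.mem_add]
        simp only [List.mem_cons]
        rw [h k]
        tauto
      rw [ih _ _ _ hnew]
      simp

theorem contains_mem_keys {d : PySem.Dict String String} {k : String}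
    (h : d.contains k = true) : k ∈ d.keys := by
  simp [PySem.Dict.contains, PySem.Dict.keys] at *
  exact h

theorem not_contains_not_mem_keys {d : PySem.Dict String String} {k : String}
    (h : d.contains k = false) : k ∉ d.keys := by
  simp [PySem.Dict.contains, PySem.Dict.keys] at *
  exact fun x hx => h _ _ hx rfl

theorem keys_insert_fresh {d : PySem.Dict String String} {k v : String}
    (h : d.contains k = false) : (d.insert k v).keys = d.keys ++ [k] := by
  have := PySem.Dict.items_foldl_insert_fresh (l := [v]) (k := fun _ => k) (v := fun x => x) (d := d) ?_ ?_
  all_goals simp_all [PySem.Dict.keys]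

theorem values_insert_fresh {d : PySem.Dict String String} {k v : String}
    (h : d.contains k = false) : (d.insert k v).values = d.values ++ [v] := by
  have := PySem.Dict.items_foldl_insert_fresh (l := [v]) (k := fun _ => k) (v := fun x => x) (d := d) ?_ ?_
  all_goals simp_all [PySem.Dict.values]

theorem pvLoopB_values (l : List String) (d : PySem.Dict String String) :
    (pvLoopB d l).values = d.values ++ pvDD d.keys (pvClean l) := by
  induction l generalizing d with
  | nil => simp [pvLoopB, pvClean, pvDD]
  | cons x t ih =>
    simp only [pvLoopB]
    by_cases hg : (x ≠ "" && PySem.Str.strip x ≠ "") = true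
    · rw [if_pos hg]
      have hg' := hg
      simp only [Bool.and_eq_true, decide_eq_true_eq, ne_eq] at hg'
      have hclean : pvClean (x :: t) = PySem.Str.strip x :: pvClean t := by
        simp [pvClean, hg'.1, hg'.2]
      by_cases hc : d.contains (PySem.Str.lower (PySem.Str.strip x)) = true
      · rw [if_pos hc, ih, hclean]
        simp only [pvDD]
        rw [if_pos (show pvKey (PySem.Str.strip x) ∈ d.keys from contains_mem_keys hc)]
      · rw [if_neg hc, ih, hclean]
        have hcf : d.contains (PySem.Str.lower (PySem.Str.strip x)) = false :=
          Bool.eq_false_iff.2 hc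
        rw [keys_insert_fresh hcf, values_insert_fresh hcf]
        simp only [pvDD]
        rw [if_neg (show pvKey (PySem.Str.strip x) ∉ d.keys from not_contains_not_mem_keys hcf)]
        rw [pvDD_congr (seen1 := d.keys ++ [PySem.Str.lower (PySem.Str.strip x)])
            (seen2 := pvKey (PySem.Str.strip x) :: d.keys) (fun a _ => by simp [pvKey, List.mem_append]; tauto)]
        simp
    · rw [if_neg hg, ih]
      have hclean : pvClean (x :: t) = pvClean t := by
        simp only [pvClean, List.filter_cons]
        rw [if_neg hg]
      rw [hclean]

-- ===== VERDICT (by name: the statement is the Claim_ definition above) =====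
theorem dedupe_longest_first_py_spec : Claim_equal_dedupe_longest_first_py := by
  intro strings _
  show dedupe_longest_first_py strings = dedupe_longest_first_py_alt strings
  rw [dedupe_longest_first_py, dedupe_longest_first_py_alt,
    pvLoopA_eq _ _ [] _ (by intro k; simp [PySem.Set.ofList]),
    pvLoopB_values, List.nil_append]
  exact pvComm (pvClean strings)
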